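-- pv_equiv track=rewrite | github.com/JWBM16/hack_python_2 | hack_6.py | fn_hack_6
-- ===== SOURCE A (Python) =====
-- def fn_hack_6(s):
--     result = s
--     _ls = []
--
--     if len(result) == 0:
--         result = ["0"]
--     else:
--         contador = 0
--         for txt in range(len(result)):
--             contador += 1
--             if contador % 2 == 0:
--                 _ls.append(str("-"))
--             else:
--                 _ls.append(str(contador))
--
--         result = "".join(_ls)
--
--         result = list(result)
--     return result
-- ===== SOURCE B (Python) =====
-- def fn_hack_6(s):
--     n = len(s)
--     if n == 0:
--         return ["0"]
--     core = "-".join(str(i) for i in range(1, n + 1, 2))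
--     if n % 2 == 0:
--         core += "-"
--     return list(core)
-- ===== Notes on version B (the rewrite author's own statement) =====
-- stated objective: simpler
-- what changed: Instead of looping over every index with a parity branch and an accumulator list, B iterates only over the odd numbers 1,3,... via range(1,n+1,2), joins them with a dash separator and appends one trailing dash exactly when n is even.
import Mathlib
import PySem

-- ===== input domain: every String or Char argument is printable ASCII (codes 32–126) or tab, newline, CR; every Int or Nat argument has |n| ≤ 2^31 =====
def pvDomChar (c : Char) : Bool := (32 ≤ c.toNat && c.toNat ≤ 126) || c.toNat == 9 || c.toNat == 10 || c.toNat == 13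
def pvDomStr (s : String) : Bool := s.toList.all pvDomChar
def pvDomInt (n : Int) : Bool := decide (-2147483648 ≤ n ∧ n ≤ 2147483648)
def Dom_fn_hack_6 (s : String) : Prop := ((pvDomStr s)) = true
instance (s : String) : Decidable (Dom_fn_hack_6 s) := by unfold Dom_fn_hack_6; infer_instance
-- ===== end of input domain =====

-- B builds the same string by iterating only over the odd numbers (dash-joined, trailing dash iff the length is even) instead of a per-index parity branch; simpler decomposition, same cost.

-- ===== PORT A =====
-- A: loop over every index, counter incremented each step, append "-" on even counts,
-- str(counter) on odd counts; join and list(). Strings handled as List Char (PySem.Chars).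
def fn_hack_6 (s : String) : List String :=
  let result := s.toList
  if PySem.Chars.len result == 0 then ["0"]
  else
    let st := (PySem.List.pyRange 0 (PySem.Chars.len result) 1).foldl
      (fun (st : Int × List (List Char)) _ =>
        let contador := st.1 + 1
        (contador, st.2 ++ [if contador % 2 == 0 then ['-'] else PySem.Int.toChars contador]))
      (0, [])
    let joined := PySem.Chars.join [] st.2
    joined.map (fun c => String.ofList [c])

-- ===== PORT B =====
def fn_hack_6_alt (s : String) : List String :=
  let n := PySem.Chars.len s.toList
  if n == 0 then ["0"]
  else
    let core := PySem.Chars.join ['-'] ((PySem.List.pyRange 1 (n + 1) 2).map PySem.Int.toChars)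
    let core := if n % 2 == 0 then core ++ ['-'] else core
    core.map (fun c => String.ofList [c])

-- ===== PRECONDITION & SPEC =====
def Spec_fn_hack_6 (s : String) (out : List String) : Prop := out = fn_hack_6_alt s
instance (s : String) (out : List String) : Decidable (Spec_fn_hack_6 s out) := by unfold Spec_fn_hack_6; infer_instance

-- ===== CLAIM (what is proved, stated in full; the proofs are below) =====
def Claim_equal_fn_hack_6 : Prop := ∀ (s : String), Dom_fn_hack_6 s → Spec_fn_hack_6 s (fn_hack_6 s)

-- ===== LEMMAS AND PROOFS =====

-- A's appended pieces, indexed by the counter value i+1 for i = 0..k-1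
def pvPiece (i : Nat) : List Char :=
  if ((i : Int) + 1) % 2 == 0 then ['-'] else PySem.Int.toChars ((i : Int) + 1)

def pvChunks (k : Nat) : List (List Char) := (List.range k).map pvPiece

-- B's odd list and core string
def pvOdds (m : Nat) : List Int := (List.range m).map (fun (j : Nat) => 1 + 2 * (j : Int))

def pvCore (m : Nat) : List Char := PySem.Chars.join ['-'] ((pvOdds m).map PySem.Int.toChars)

lemma pvJoin_empty_sep (l : List (List Char)) : PySem.Chars.join [] l = l.flatten := by
  induction l with
  | nil => simp [PySem.Chars.join_nil]
  | cons p rest ih =>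
    cases rest with
    | nil => simp [PySem.Chars.join_singleton]
    | cons q r => simp [PySem.Chars.join_cons_cons, ih]

lemma pvJoin_append_singleton (sep x : List Char) (l : List (List Char)) (h : l ≠ []) :
    PySem.Chars.join sep (l ++ [x]) = PySem.Chars.join sep l ++ sep ++ x := by
  induction l with
  | nil => simp at h
  | cons p rest ih =>
    cases rest with
    | nil => simp [PySem.Chars.join_cons_cons, PySem.Chars.join_singleton]
    | cons q r =>
      have := ih (by simp)
      simp only [List.cons_append, PySem.Chars.join_cons_cons] at this ⊢
      simp [this]

lemma pvLoopA (k : Nat) :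
    (PySem.List.pyRange 0 (k : Int) 1).foldl
      (fun (st : Int × List (List Char)) _ =>
        let contador := st.1 + 1
        (contador, st.2 ++ [if contador % 2 == 0 then ['-'] else PySem.Int.toChars contador]))
      (0, []) = ((k : Int), pvChunks k) := by
  induction k with
  | zero => simp [PySem.List.pyRange_one_eq_nil, pvChunks]
  | succ k ih =>
    have hrange : PySem.List.pyRange 0 ((k : Int) + 1) 1
        = PySem.List.pyRange 0 (k : Int) 1 ++ [(k : Int)] := by
      simpa using PySem.List.pyRange_one_succ_right (a := 0) (b := (k : Int)) (by positivity)
    push_cast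
    rw [hrange, List.foldl_append, ih]
    simp [pvChunks, List.range_succ, pvPiece]

lemma pvRangeOdds (k : Nat) :
    PySem.List.pyRange 1 ((k : Int) + 1) 2 = pvOdds ((k + 1) / 2) := by
  rw [PySem.List.pyRange_of_pos _ _ (by norm_num)]
  unfold pvOdds
  congr 1
  split_ifs with h
  · congr 1
    omega
  · congr 1
    omega

lemma pvCore_succ (m : Nat) (hm : m ≠ 0) :
    pvCore (m + 1) = pvCore m ++ ['-'] ++ PySem.Int.toChars (1 + 2 * (m : Int)) := by
  unfold pvCore pvOdds
  rw [List.range_succ]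
  simp only [List.map_append, List.map_cons, List.map_nil]
  rw [pvJoin_append_singleton _ _ _ (by simp [hm])]

-- The core equality: A's flattened chunk list equals B's core plus trailing dash, for k ≥ 1.
lemma pvMain (k : Nat) (hk : 1 ≤ k) :
    (pvChunks k).flatten
      = pvCore ((k + 1) / 2) ++ (if (k : Int) % 2 == 0 then ['-'] else []) := by
  induction k with
  | zero => omega
  | succ k ih =>
    rcases Nat.eq_or_lt_of_le hk with h1 | h1
    · -- k + 1 = 1
      have : k = 0 := by omega
      subst this
      simp [pvChunks, pvPiece, pvCore, pvOdds, PySem.Chars.join_singleton]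
    · have hk1 : 1 ≤ k := by omega
      have ih' := ih hk1
      have hchunks : pvChunks (k + 1) = pvChunks k ++ [pvPiece k] := by
        simp [pvChunks, List.range_succ]
      rw [hchunks, List.flatten_append, ih']
      rcases Nat.even_or_odd k with he | ho
      · -- k even (k ≥ 2), k+1 odd: piece is toChars (k+1), appended to core
        obtain ⟨t, ht⟩ := he
        have ht' : k = 2 * t := by omega
        have htpos : t ≠ 0 := by omega
        have hmod : ((k : Int) + 1) % 2 ≠ 0 := by omega
        have hmodk : (k : Int) % 2 = 0 := by omega
        have hdiv1 : (k + 1) / 2 = t := by omega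
        have hdiv2 : (k + 1 + 1) / 2 = t + 1 := by omega
        have hne : (((k : Nat) + 1 : Nat) : Int) % 2 ≠ 0 := by push_cast; omega
        simp only [pvPiece, hdiv1, hdiv2, hmodk]
        rw [pvCore_succ t htpos]
        have h1t : (1 : Int) + 2 * (t : Int) = (k : Int) + 1 := by omega
        simp [hmod, h1t]
      · -- k odd, k+1 even: piece is ['-'], core unchanged
        obtain ⟨t, ht⟩ := ho
        have hmod : ((k : Int) + 1) % 2 = 0 := by omega
        have hmodk : ¬ ((k : Int) % 2 = 0) := by omega
        have heq : (k + 1 + 1) / 2 = (k + 1) / 2 := by omega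
        have he2 : (((k : Nat) + 1 : Nat) : Int) % 2 = 0 := by push_cast; omega
        simp only [pvPiece, heq, hmod]
        simp [hmodk]
        omega

-- ===== VERDICT (by name: the statement is the Claim_ definition above) =====
theorem fn_hack_6_spec : Claim_equal_fn_hack_6 := by
  intro s _
  unfold Spec_fn_hack_6 fn_hack_6 fn_hack_6_alt
  simp only [PySem.Chars.len_eq]
  by_cases h0 : s.toList.length = 0
  · simp [h0]
  · set k := s.toList.length with hkdef
    have hk : 1 ≤ k := by omega
    have hne : ((k : Int) == 0) = false := by
      simp only [beq_eq_false_iff_ne, ne_eq]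
      exact_mod_cast h0
    rw [pvLoopA k]
    simp only [hne, Bool.false_eq_true, if_false]
    rw [pvJoin_empty_sep, pvRangeOdds k, pvMain k hk]
    rcases Nat.even_or_odd k with he | ho
    · obtain ⟨t, ht⟩ := he
      have hp : ((k : Int) % 2 == 0) = true := by
        simp only [beq_iff_eq]; omega
      simp [hp, pvCore]
    · obtain ⟨t, ht⟩ := ho
      have hp : ((k : Int) % 2 == 0) = false := by
        simp only [beq_eq_false_iff_ne, ne_eq]; omega
      simp [hp, pvCore]
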